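-- pv_equiv track=rewrite | github.com/wonza-hub/Algorithm | Heap/신입사원교육.py | solution
-- ===== SOURCE A (Python) =====
-- import heapq as hq
--
-- def solution(ability, number):
--     hq.heapify(ability)
--     while number > 0:
--         a = hq.heappop(ability)
--         b = hq.heappop(ability)
--         a, b = a + b, a + b
--         hq.heappush(ability, a)
--         hq.heappush(ability, b)
--         number -= 1
--
--     return sum(ability)
-- ===== SOURCE B (Python) =====
-- def _insert(v, xs):
--     # linear insertion into a sorted list, keeping it sorted
--     out = []
--     i = 0
--     while i < len(xs) and xs[i] < v:
--         out.append(xs[i])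
--         i += 1
--     return out + [v] + xs[i:]
--
--
-- def solution(ability, number):
--     # sorted-list strategy: sort once, then the two smallest are always xs[0], xs[1];
--     # reinsert the sum twice with a linear ordered insertion (does not mutate `ability`)
--     xs = sorted(ability)
--     while number > 0:
--         s = xs[0] + xs[1]
--         xs = _insert(s, _insert(s, xs[2:]))
--         number -= 1
--     return sum(xs)
-- ===== Notes on version B (the rewrite author's own statement) =====
-- stated objective: alternative
-- what changed: Replaces the binary heap with a sort-once sorted list: the two smallest are always the first two elements, and each round's sum is put back twice by a linear ordered insertion; B also leaves the argument list unmutated where A reorders it in place.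
import Mathlib
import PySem

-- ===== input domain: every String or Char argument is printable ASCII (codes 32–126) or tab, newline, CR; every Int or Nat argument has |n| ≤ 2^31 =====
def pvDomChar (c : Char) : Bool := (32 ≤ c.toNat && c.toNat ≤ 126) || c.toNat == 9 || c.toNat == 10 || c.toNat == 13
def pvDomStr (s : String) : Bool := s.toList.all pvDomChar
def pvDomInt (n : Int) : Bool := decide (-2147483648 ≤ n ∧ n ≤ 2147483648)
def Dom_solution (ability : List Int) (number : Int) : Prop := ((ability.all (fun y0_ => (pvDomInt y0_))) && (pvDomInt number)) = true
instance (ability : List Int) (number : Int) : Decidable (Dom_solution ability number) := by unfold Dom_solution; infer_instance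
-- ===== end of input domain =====

-- B replaces the heap with a sort-once + ordered-reinsertion loop (alternative, not faster);
-- equivalence is about the RETURN value only: Python A reorders `ability` in place, B does not mutate it.

-- ===== PORT A =====
-- heapq is a C library; its operations are ported by their documented contract:
-- heappop removes and returns the smallest element, heappush adds an element,
-- heapify reorders in place (multiset unchanged).  Exact for the returned sum.
def pvHeappop (l : List Int) : Option (Int × List Int) :=
  match PySem.List.min? l (fun x => x) with
  | none => none                -- heappop from an empty heap: IndexError
  | some m => some (m, l.erase m)

def pvLoopA (l : List Int) : Nat → Option (List Int)
  | 0 => some l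
  | n + 1 =>
    match pvHeappop l with
    | none => none
    | some (a, l1) =>
      match pvHeappop l1 with
      | none => none
      | some (b, l2) => pvLoopA (l2 ++ [a + b, a + b]) n

def solution (ability : List Int) (number : Int) : Int :=
  match pvLoopA ability number.toNat with
  | some l => l.sum
  | none => 0                   -- unreachable under Pre_solution (Python raises IndexError there)

-- ===== PORT B =====
def pvInsert (v : Int) : List Int → List Int
  | [] => [v]
  | x :: t => if x < v then x :: pvInsert v t else v :: x :: t

def pvLoopB (xs : List Int) : Nat → Option (List Int)
  | 0 => some xs
  | n + 1 =>
    match xs with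
    | a :: b :: rest => pvLoopB (pvInsert (a + b) (pvInsert (a + b) rest)) n
    | _ => none                 -- xs[0] / xs[1] on a short list: IndexError

def solution_alt (ability : List Int) (number : Int) : Int :=
  match pvLoopB (PySem.List.sorted ability (fun x => x)) number.toNat with
  | some l => l.sum
  | none => 0

-- ===== PRECONDITION & SPEC =====
-- Pre_ excludes exactly the inputs where Python A raises IndexError:
-- a positive number of rounds with fewer than two elements available.
def Pre_solution (ability : List Int) (number : Int) : Prop :=
  number ≤ 0 ∨ 2 ≤ ability.length
instance (ability : List Int) (number : Int) : Decidable (Pre_solution ability number) := by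
  unfold Pre_solution; infer_instance

def pvWitness_solution : List Int × Int := ([3, 1, 2, 1], 2)

def Spec_solution (ability : List Int) (number : Int) (out : Int) : Prop := out = solution_alt ability number
instance (ability : List Int) (number : Int) (out : Int) : Decidable (Spec_solution ability number out) := by unfold Spec_solution; infer_instance

-- ===== CLAIM (what is proved, stated in full; the proofs are below) =====
def Claim_equal_solution : Prop := ∀ (ability : List Int) (number : Int), Dom_solution ability number → Pre_solution ability number → Spec_solution ability number (solution ability number)

-- ===== LEMMAS AND PROOFS =====

theorem pvInsert_perm (v : Int) (xs : List Int) : (pvInsert v xs).Perm (v :: xs) := by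
  induction xs with
  | nil => simp [pvInsert]
  | cons x t ih =>
    by_cases h : x < v
    · simpa [pvInsert, h] using ((ih.cons x).trans (List.Perm.swap v x t))
    · simp [pvInsert, h]

theorem pvInsert_sorted (v : Int) (xs : List Int) (h : xs.Pairwise (· ≤ ·)) :
    (pvInsert v xs).Pairwise (· ≤ ·) := by
  induction xs with
  | nil => simp [pvInsert]
  | cons x t ih =>
    rw [List.pairwise_cons] at h
    by_cases hx : x < v
    · rw [pvInsert, if_pos hx, List.pairwise_cons]
      refine ⟨?_, ih h.2⟩
      intro b hb
      rcases List.mem_cons.mp (((pvInsert_perm v t).mem_iff).mp hb) with hb | hb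
      · exact hb ▸ le_of_lt hx
      · exact h.1 b hb
    · rw [pvInsert, if_neg hx, List.pairwise_cons]
      refine ⟨?_, List.pairwise_cons.mpr h⟩
      intro b hb
      rcases List.mem_cons.mp hb with hb | hb
      · exact hb ▸ le_of_not_gt hx
      · exact le_trans (le_of_not_gt hx) (h.1 b hb)

theorem pvMin_of_perm (l : List Int) (a : Int) (t : List Int)
    (hp : l.Perm (a :: t)) (hs : (a :: t).Pairwise (· ≤ ·)) :
    PySem.List.min? l (fun x => x) = some a := by
  cases hm : PySem.List.min? l (fun x => x) with
  | none =>
    have : l = [] := (PySem.List.min?_eq_none_iff l (fun x => x)).mp hm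
    subst this
    exact absurd hp.symm.eq_nil (by simp)
  | some m =>
    have hmem : m ∈ a :: t := hp.mem_iff.mp (PySem.List.min?_mem hm)
    have hma : m ≤ a := by
      simpa using PySem.List.min?_isMin hm a (hp.mem_iff.mpr (List.mem_cons_self))
    have ham : a ≤ m := by
      rcases List.mem_cons.mp hmem with h | h
      · exact h.ge
      · exact (List.pairwise_cons.mp hs).1 m h
    exact congrArg some (le_antisymm hma ham)

theorem pvLoop_agree : ∀ (n : Nat) (l s : List Int), l.Perm s → s.Pairwise (· ≤ ·) →
    (pvLoopA l n = none ∧ pvLoopB s n = none) ∨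
      (∃ l' s', pvLoopA l n = some l' ∧ pvLoopB s n = some s' ∧ l'.Perm s') := by
  intro n
  induction n with
  | zero => exact fun l s hp _ => Or.inr ⟨l, s, rfl, rfl, hp⟩
  | succ n ih =>
    intro l s hp hs
    match s with
    | [] =>
      have hl : l = [] := hp.eq_nil
      subst hl
      exact Or.inl ⟨by simp [pvLoopA, pvHeappop, PySem.List.min?], by simp [pvLoopB]⟩
    | [x] =>
      have hl : l = [x] := List.perm_singleton.mp hp
      subst hl
      refine Or.inl ⟨?_, by simp [pvLoopB]⟩
      simp [pvLoopA, pvHeappop, PySem.List.min?]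
    | a :: b :: rest =>
      have hs' : (b :: rest).Pairwise (· ≤ ·) := hs.of_cons
      have h1 : pvHeappop l = some (a, l.erase a) := by
        simp [pvHeappop, pvMin_of_perm l a (b :: rest) hp hs]
      have hl1 : (l.erase a).Perm (b :: rest) := by
        simpa [List.erase_cons_head] using hp.erase a
      have h2 : pvHeappop (l.erase a) = some (b, (l.erase a).erase b) := by
        simp [pvHeappop, pvMin_of_perm (l.erase a) b rest hl1 hs']
      have hl2 : ((l.erase a).erase b).Perm rest := by
        simpa [List.erase_cons_head] using hl1.erase b
      have hperm : (((l.erase a).erase b) ++ [a + b, a + b]).Perm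
          (pvInsert (a + b) (pvInsert (a + b) rest)) := by
        refine ((hl2.append_right [a + b, a + b]).trans List.perm_append_comm).trans ?_
        exact ((pvInsert_perm (a + b) (pvInsert (a + b) rest)).trans
          ((pvInsert_perm (a + b) rest).cons (a + b))).symm
      have hsort : (pvInsert (a + b) (pvInsert (a + b) rest)).Pairwise (· ≤ ·) :=
        pvInsert_sorted _ _ (pvInsert_sorted _ _ hs'.of_cons)
      have hA : pvLoopA l (n + 1) = pvLoopA (((l.erase a).erase b) ++ [a + b, a + b]) n := by
        simp [pvLoopA, h1, h2]
      have hB : pvLoopB (a :: b :: rest) (n + 1)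
          = pvLoopB (pvInsert (a + b) (pvInsert (a + b) rest)) n := by
        simp [pvLoopB]
      rw [hA, hB]
      exact ih _ _ hperm hsort

-- ===== VERDICT (by name: the statement is the Claim_ definition above) =====
theorem solution_spec : Claim_equal_solution := by
  intro ability number _ hpre
  unfold Spec_solution solution solution_alt
  have hp : ability.Perm (PySem.List.sorted ability (fun x => x)) :=
    (PySem.List.sorted_perm ability (fun x => x) false).symm
  have hs : (PySem.List.sorted ability (fun x => x)).Pairwise (· ≤ ·) :=
    PySem.List.sorted_pairwise ability (fun x => x)
  rcases hpre with hnum | _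
  · -- no rounds: both loops return their input; the sums agree up to permutation
    rw [Int.toNat_of_nonpos hnum]
    simpa [pvLoopA, pvLoopB] using hp.sum_eq
  · rcases pvLoop_agree number.toNat ability _ hp hs with ⟨h1, h2⟩ | ⟨l', s', h1, h2, h3⟩
    · rw [h1, h2]
    · rw [h1, h2]; exact h3.sum_eq
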